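-- pv_equiv track=rewrite | github.com/mvarukha/nsuprog | practicum12.py | max_consecutive_spaces
-- ===== SOURCE A (Python) =====
-- def max_consecutive_spaces(text):
--     max_count = 0
--     current_count = 0
--
--     i = 0
--     while i < len(text):
--         if text[i] == ' ' or text[i] == '\t' or text[i] == '\n':
--             current_count += 1
--             if current_count > max_count:
--                 max_count = current_count
--         else:
--             current_count = 0
--         i += 1
--
--     return max_count
-- ===== SOURCE B (Python) =====
-- def max_consecutive_spaces(text):
--     # Run-segmentation: scan to the end of each whitespace run with an inner
--     # pointer and compare whole run lengths, instead of an incremental counter.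
--     WS = ' \t\n'
--     best = 0
--     i = 0
--     n = len(text)
--     while i < n:
--         if text[i] in WS:
--             j = i
--             while j < n and text[j] in WS:
--                 j += 1
--             if j - i > best:
--                 best = j - i
--             i = j
--         else:
--             i += 1
--     return best
-- ===== Notes on version B (the rewrite author's own statement) =====
-- stated objective: faster
-- what changed: B segments the text into maximal whitespace runs with an inner two-pointer scan and compares whole run lengths, instead of A's per-character incremental counter with a max update on every whitespace character.
import Mathlib
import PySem

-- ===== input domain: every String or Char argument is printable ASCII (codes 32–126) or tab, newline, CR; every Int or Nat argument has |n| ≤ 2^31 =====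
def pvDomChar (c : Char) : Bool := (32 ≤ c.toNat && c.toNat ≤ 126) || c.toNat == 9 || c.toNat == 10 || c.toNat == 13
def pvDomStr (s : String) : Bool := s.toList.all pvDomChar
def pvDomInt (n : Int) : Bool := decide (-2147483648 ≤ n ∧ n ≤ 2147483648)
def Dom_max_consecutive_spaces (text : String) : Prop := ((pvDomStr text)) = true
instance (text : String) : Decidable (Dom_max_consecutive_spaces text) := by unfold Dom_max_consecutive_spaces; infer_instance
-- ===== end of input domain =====

-- B segments the text into maximal whitespace runs and compares whole run lengths,
-- instead of A's per-character incremental counter; same O(n) cost, different shape.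

-- ===== PORT A =====
-- A's while loop over indices, as structural recursion over the characters,
-- carrying (max_count, current_count).
def aLoop : List Char → Int → Int → Int
  | [], maxC, _ => maxC
  | ch :: rest, maxC, curC =>
    if ch = ' ' ∨ ch = '\t' ∨ ch = '\n' then
      let cur := curC + 1
      let mx := if cur > maxC then cur else maxC
      aLoop rest mx cur
    else
      aLoop rest maxC 0

def max_consecutive_spaces (text : String) : Int :=
  aLoop text.toList 0 0

-- ===== PORT B =====
def isWsB (c : Char) : Bool := c = ' ' || c = '\t' || c = '\n'

-- B's outer loop: on a whitespace character, the inner j-scan consumes the whole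
-- run (takeWhile/dropWhile = the two-pointer scan) and compares its length.
def bLoop : List Char → Int → Int
  | [], best => best
  | c :: cs, best =>
    if isWsB c then
      let run := cs.takeWhile isWsB
      let rest := cs.dropWhile isWsB
      let len : Int := 1 + run.length
      bLoop rest (if len > best then len else best)
    else
      bLoop cs best
termination_by l _ => l.length
decreasing_by
  · exact Nat.lt_succ_of_le (cs.length_dropWhile_le isWsB)
  · simp

def max_consecutive_spaces_alt (text : String) : Int :=
  bLoop text.toList 0

-- ===== PRECONDITION & SPEC =====
def Spec_max_consecutive_spaces (text : String) (out : Int) : Prop := out = max_consecutive_spaces_alt text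
instance (text : String) (out : Int) : Decidable (Spec_max_consecutive_spaces text out) := by unfold Spec_max_consecutive_spaces; infer_instance

-- ===== CLAIM (what is proved, stated in full; the proofs are below) =====
def Claim_equal_max_consecutive_spaces : Prop := ∀ (text : String), Dom_max_consecutive_spaces text → Spec_max_consecutive_spaces text (max_consecutive_spaces text)

-- ===== LEMMAS AND PROOFS =====

-- reference function: g l c = final max assuming the pending run has length c
-- and everything seen so far is already ≤ the pending information
def gRef : List Char → Int → Int
  | [], c => c
  | x :: xs, c => if isWsB x then gRef xs (c + 1) else max c (gRef xs 0)

theorem gRef_ge : ∀ (l : List Char) (c : Int), c ≤ gRef l c := by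
  intro l
  induction l with
  | nil => intro c; simp [gRef]
  | cons x xs ih =>
    intro c
    simp only [gRef]
    split
    · exact le_trans (by omega) (ih (c + 1))
    · exact le_max_left _ _

theorem aLoop_eq_gRef : ∀ (l : List Char) (m c : Int), 0 ≤ c → c ≤ m →
    aLoop l m c = max m (gRef l c) := by
  intro l
  induction l with
  | nil => intro m c _ h2; simp [aLoop, gRef]; omega
  | cons x xs ih =>
    intro m c h1 h2
    by_cases hw : isWsB x = true
    · have hp : x = ' ' ∨ x = '\t' ∨ x = '\n' := by
        simp [isWsB] at hw; tauto
      simp only [aLoop, gRef, if_pos hp, if_pos hw]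
      have hge := gRef_ge xs (c + 1)
      have := ih (if c + 1 > m then c + 1 else m) (c + 1) (by omega) (by omega)
      rw [this]
      omega
    · have hp : ¬ (x = ' ' ∨ x = '\t' ∨ x = '\n') := by
        simp [isWsB] at hw; tauto
      simp only [aLoop, gRef, if_neg hp, if_neg hw]
      have hge := gRef_ge xs (0 : Int)
      rw [ih m 0 le_rfl (by omega)]
      omega

-- a whole whitespace run just increments the pending counter
theorem gRef_ws_append : ∀ (run rest : List Char), (∀ y ∈ run, isWsB y = true) →
    ∀ c : Int, gRef (run ++ rest) c = gRef rest (c + run.length) := by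
  intro run
  induction run with
  | nil => intro rest _ c; simp
  | cons x xs ih =>
    intro rest h c
    have hx : isWsB x = true := h x (by simp)
    simp only [List.cons_append, gRef, if_pos hx]
    rw [ih rest (fun y hy => h y (by simp [hy])) (c + 1)]
    congr 1
    simp only [List.length_cons]
    push_cast
    omega

-- when the list is empty or starts with a non-whitespace char, the pending
-- counter just competes with the rest's best
theorem gRef_flush : ∀ (rest : List Char), (∀ z ∈ rest.head?, isWsB z = false) →
    ∀ c : Int, 0 ≤ c → gRef rest c = max c (gRef rest 0) := by
  intro rest h c hc
  cases rest with
  | nil => simp [gRef]; omega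
  | cons z zs =>
    have hz : isWsB z = false := h z (by simp)
    simp only [gRef, hz, Bool.false_eq_true, if_false]
    have := gRef_ge zs (0 : Int)
    omega

theorem bLoop_eq_gRef : ∀ (n : ℕ) (l : List Char), l.length ≤ n →
    ∀ best : Int, 0 ≤ best → bLoop l best = max best (gRef l 0) := by
  intro n
  induction n with
  | zero =>
    intro l hl best hb
    have : l = [] := List.eq_nil_of_length_eq_zero (by omega)
    subst this
    simp [bLoop, gRef]; omega
  | succ n ih =>
    intro l hl best hb
    cases l with
    | nil => simp [bLoop, gRef]; omega
    | cons c cs =>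
      by_cases hw : isWsB c = true
      · simp only [bLoop, if_pos hw]
        have hrest : (cs.dropWhile isWsB).length ≤ n := by
          have := cs.length_dropWhile_le isWsB
          simp at hl; omega
        set run := cs.takeWhile isWsB with hrun
        set rest := cs.dropWhile isWsB with hrestdef
        have hsplit : c :: cs = (c :: run) ++ rest := by
          simp [hrun, hrestdef, List.takeWhile_append_dropWhile]
        have hall : ∀ y ∈ c :: run, isWsB y = true := by
          intro y hy
          rcases List.mem_cons.mp hy with h | h
          · subst h; exact hw
          · exact List.mem_takeWhile_imp h
        have hhead : ∀ z ∈ rest.head?, isWsB z = false := by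
          intro z hz
          have := List.head?_dropWhile_not isWsB cs
          rw [← hrestdef] at this
          cases hr : rest.head? with
          | none => simp [hr] at hz
          | some w =>
            simp [hr] at hz this
            subst hz
            simpa using this
        rw [ih rest hrest _ (by omega)]
        have hg : gRef (c :: cs) 0 = max (1 + (run.length : Int)) (gRef rest 0) := by
          rw [hsplit, gRef_ws_append (c :: run) rest hall 0]
          rw [gRef_flush rest hhead _ (by positivity)]
          congr 1
          simp only [List.length_cons]
          push_cast
          omega
        rw [hg]
        omega
      · simp only [bLoop, if_neg hw]
        have : cs.length ≤ n := by simp at hl; omega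
        rw [ih cs this best hb]
        simp only [gRef, if_neg hw]
        have := gRef_ge cs (0 : Int)
        omega

-- ===== VERDICT (by name: the statement is the Claim_ definition above) =====
theorem max_consecutive_spaces_spec : Claim_equal_max_consecutive_spaces := by
  intro text _
  unfold Spec_max_consecutive_spaces max_consecutive_spaces max_consecutive_spaces_alt
  rw [aLoop_eq_gRef text.toList 0 0 le_rfl le_rfl,
      bLoop_eq_gRef text.toList.length text.toList le_rfl 0 le_rfl]
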